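-- pv_equiv track=rewrite | github.com/AdamZhouSE/pythonHomework | Code/CodeRecords/2506/60788/248667.py | f
-- ===== SOURCE A (Python) =====
-- def f(s):
--     if len(s) == 1:
--         return [s]
--     else:
--         start=s[0]
--         t=f(s[1:])
--         length=len(t)
--         for i in range(length):
--             if t[i][0]>start:
--                 t.append(t[i].copy())
--                 t[i].insert(0,start)
--         return t
-- ===== SOURCE B (Python) =====
-- def f(s):
--     if len(s) == 1:
--         return [s]
--     L = [[s[-1]]]
--     for start in reversed(s[:-1]):
--         appended = []
--         for i in range(len(L)):
--             if L[i][0] > start: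
--                 appended.append(L[i][:])
--                 L[i] = [start] + L[i]
--         L.extend(appended)
--     return L
-- ===== Notes on version B (the rewrite author's own statement) =====
-- stated objective: alternative
-- what changed: Replaces the tail recursion with an explicit iterative loop over the reversed prefix, and replaces A's append-during-scan (over a pre-recorded length) with a separate 'appended' accumulator extended after each scan.
import Mathlib
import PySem

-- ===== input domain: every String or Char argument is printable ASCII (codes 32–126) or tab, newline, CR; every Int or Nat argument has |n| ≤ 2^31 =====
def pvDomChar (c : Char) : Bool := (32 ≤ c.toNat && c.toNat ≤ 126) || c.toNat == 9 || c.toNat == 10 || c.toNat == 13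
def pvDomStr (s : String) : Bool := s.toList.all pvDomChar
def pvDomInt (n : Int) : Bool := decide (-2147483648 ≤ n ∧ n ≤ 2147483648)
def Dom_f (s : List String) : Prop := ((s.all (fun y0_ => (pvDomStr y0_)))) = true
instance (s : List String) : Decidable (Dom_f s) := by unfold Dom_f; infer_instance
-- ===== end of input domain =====

-- B replaces A's recursion by an explicit iterative loop with a separate 'appended' accumulator (objective: alternative; return-value equivalence only — A mutates list elements in place).

-- ===== PORT A =====
-- loop body: if t[i][0] > start: t.append(t[i].copy()); t[i].insert(0, start)
def fStepA (start : String) (t : List (List String)) (i : Int) : List (List String) :=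
  let ti := PySem.List.pyGetD t i []
  if start < PySem.List.pyGetD ti 0 "" then
    PySem.List.pySetD (t ++ [ti]) i (start :: ti)
  else t

def f : List String → List (List String)
  | [] => []            -- Python raises IndexError (s[0] on empty); excluded by Pre_f
  | [x] => [[x]]
  | start :: rest =>
      let t := f rest
      let length := (t.length : Int)
      (PySem.List.pyRange 0 length 1).foldl (fStepA start) t

-- ===== PORT B =====
-- inner loop body: if L[i][0] > start: appended.append(L[i][:]); L[i] = [start] + L[i]
def fStepB (start : String) (p : List (List String) × List (List String)) (i : Int) :
    List (List String) × List (List String) :=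
  let li := PySem.List.pyGetD p.1 i []
  if start < PySem.List.pyGetD li 0 "" then
    (PySem.List.pySetD p.1 i (start :: li), p.2 ++ [li])
  else p

-- one outer-loop iteration: scan L over its current length, then L.extend(appended)
def fStepFull (L : List (List String)) (start : String) : List (List String) :=
  let p := (PySem.List.pyRange 0 (L.length : Int) 1).foldl (fStepB start) (L, [])
  p.1 ++ p.2

def f_alt (s : List String) : List (List String) :=
  if s.length = 1 then [s]
  else
    let L0 := [[PySem.List.pyGetD s (-1) ""]]
    ((PySem.List.slice s none (some (-1))).reverse).foldl fStepFull L0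

-- ===== PRECONDITION & SPEC =====
-- Pre_f excludes only the empty list, on which Python A raises IndexError (s[0]).
def Pre_f (s : List String) : Prop := s ≠ []
instance (s : List String) : Decidable (Pre_f s) := by unfold Pre_f; infer_instance
def pvWitness_f : List String := ["b", "a", "c"]
def Spec_f (s : List String) (out : List (List String)) : Prop := out = f_alt s
instance (s : List String) (out : List (List String)) : Decidable (Spec_f s out) := by unfold Spec_f; infer_instance

-- ===== CLAIM (what is proved, stated in full; the proofs are below) =====
def Claim_equal_f : Prop := ∀ (s : List String), Dom_f s → Pre_f s → Spec_f s (f s)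

-- ===== LEMMAS AND PROOFS =====

-- loop invariant: A's state is cur ++ app, B keeps the pair (cur, app)
lemma loop_inv (start : String) (k : Nat) :
    ∀ (j : Int) (cur app : List (List String)), 0 ≤ j → (cur.length : Int) - j = (k : Int) →
    (PySem.List.pyRange j (cur.length : Int) 1).foldl (fStepA start) (cur ++ app)
      = (let p := (PySem.List.pyRange j (cur.length : Int) 1).foldl (fStepB start) (cur, app);
         p.1 ++ p.2) := by
  induction k with
  | zero =>
      intro j cur app hj hk
      rw [PySem.List.pyRange_one_eq_nil (by omega)]
      simp
  | succ k ih =>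
      intro j cur app hj hk
      have hjlt : j < (cur.length : Int) := by omega
      rw [PySem.List.pyRange_one_cons hjlt]
      simp only [List.foldl_cons]
      have hjn : j.toNat < cur.length := by omega
      have hget : PySem.List.pyGetD (cur ++ app) j ([] : List String) = cur[j.toNat] := by
        rw [PySem.List.pyGetD_eq_getElem _ _ hj (by simp; omega)]
        exact List.getElem_append_left hjn
      have hgetB : PySem.List.pyGetD cur j ([] : List String) = cur[j.toNat] :=
        PySem.List.pyGetD_eq_getElem _ _ hj (by omega)
      by_cases hc : start < PySem.List.pyGetD (cur[j.toNat]) 0 ""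
      · -- condition fires: A sets in the appended list, B sets and records the copy
        have hA : fStepA start (cur ++ app) j
            = cur.set j.toNat (start :: cur[j.toNat]) ++ (app ++ [cur[j.toNat]]) := by
          simp only [fStepA, hget, if_pos hc]
          rw [PySem.List.pySetD_of_nonneg _ _ hj]
          rw [List.append_assoc, List.set_append_left _ _ hjn]
        have hB : fStepB start (cur, app) j
            = (cur.set j.toNat (start :: cur[j.toNat]), app ++ [cur[j.toNat]]) := by
          simp only [fStepB, hgetB, if_pos hc]
          rw [PySem.List.pySetD_of_nonneg _ _ hj]
        rw [hA, hB]
        have hlen : ((cur.set j.toNat (start :: cur[j.toNat])).length : Int) = (cur.length : Int) := by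
          simp
        have := ih (j + 1) (cur.set j.toNat (start :: cur[j.toNat])) (app ++ [cur[j.toNat]])
          (by omega) (by rw [hlen]; omega)
        rw [hlen] at this
        exact this
      · have hA : fStepA start (cur ++ app) j = cur ++ app := by
          simp only [fStepA, hget, if_neg hc]
        have hB : fStepB start (cur, app) j = (cur, app) := by
          simp only [fStepB, hgetB, if_neg hc]
        rw [hA, hB]
        exact ih (j + 1) cur app (by omega) (by omega)

-- A's in-place scan over the pre-recorded length equals one B outer-loop iteration
lemma stepA_eq_full (start : String) (t : List (List String)) :
    (PySem.List.pyRange 0 (t.length : Int) 1).foldl (fStepA start) t = fStepFull t start := by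
  have := loop_inv start t.length 0 t [] le_rfl (by omega)
  simpa [fStepFull] using this

-- characterisation of A as B's iterative loop
lemma f_eq_loop : ∀ (s : List String) (h : s ≠ []),
    f s = s.dropLast.reverse.foldl fStepFull [[s.getLast h]] := by
  intro s
  induction s with
  | nil => intro h; exact absurd rfl h
  | cons start rest ih =>
      intro h
      cases rest with
      | nil => simp [f]
      | cons y ys =>
          have hr : (y :: ys) ≠ [] := by simp
          have : f (start :: y :: ys)
              = (PySem.List.pyRange 0 ((f (y :: ys)).length : Int) 1).foldl (fStepA start) (f (y :: ys)) := by
            rfl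
          rw [this, stepA_eq_full, ih hr]
          rw [show (start :: y :: ys).dropLast = start :: (y :: ys).dropLast from rfl]
          rw [List.reverse_cons, List.foldl_append]
          simp [List.getLast_cons hr]

theorem f_spec_aux : ∀ (s : List String), Pre_f s → f s = f_alt s := by
  intro s hs
  unfold f_alt
  by_cases h1 : s.length = 1
  · obtain ⟨x, hx⟩ : ∃ x, s = [x] := by
      cases s with
      | nil => simp at h1
      | cons a t => cases t with
        | nil => exact ⟨a, rfl⟩
        | cons b u => simp at h1
    subst hx
    simp [f]
  · rw [if_neg h1]
    rw [f_eq_loop s hs]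
    rw [PySem.List.slice_to_neg_one]
    rw [PySem.List.pyGetD_neg_one _ _ hs]

-- ===== VERDICT (by name: the statement is the Claim_ definition above) =====
theorem f_spec : Claim_equal_f := by
  intro s _ hs
  exact f_spec_aux s hs
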